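-- pv_equiv track=rewrite | github.com/nherbaut/scholar.miage.dev | app/app/query_analyzer.py | _unwrap_outer_parens
-- ===== SOURCE A (Python) =====
-- def _unwrap_outer_parens(expr: str) -> str:
--     """
--     If the entire expression is wrapped in a single pair of parentheses, strip them.
--     Preserves inner spacing.
--     """
--     stripped = expr.strip()
--     if not (stripped.startswith("(") and stripped.endswith(")")):
--         return expr
--     depth = 0
--     for i, ch in enumerate(stripped):
--         if ch == "(":
--             depth += 1
--         elif ch == ")":
--             depth -= 1
--             if depth == 0 and i != len(stripped) - 1:
--                 return expr  # closing before end -> not a single wrapper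
--     if depth == 0:
--         inner = stripped[1:-1]
--         # keep original spacing around inner content that was inside the wrapper
--         leading = len(expr) - len(expr.lstrip())
--         trailing = len(expr) - len(expr.rstrip())
--         return (" " * leading) + inner + (" " * trailing)
--     return expr
-- ===== SOURCE B (Python) =====
-- def _unwrap_outer_parens(expr: str) -> str:
--     """
--     If the entire expression is wrapped in a single pair of parentheses, strip them.
--     Preserves inner spacing.
--     """
--     stripped = expr.strip()
--     if not (stripped.startswith("(") and stripped.endswith(")")):
--         return expr
--     # The outer pair is a single wrapper exactly when the INNER text is itself a
--     # balanced parenthesis word.  Check that by string rewriting: keep only the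
--     # parens and repeatedly cancel adjacent "()" pairs; balanced iff nothing is left.
--     inner = stripped[1:-1]
--     parens = "".join(ch for ch in inner if ch in "()")
--     while "()" in parens:
--         parens = parens.replace("()", "")
--     if parens:
--         return expr
--     leading = len(expr) - len(expr.lstrip())
--     trailing = len(expr) - len(expr.rstrip())
--     return (" " * leading) + inner + (" " * trailing)
-- ===== Notes on version B (the rewrite author's own statement) =====
-- stated objective: alternative
-- what changed: Instead of A's early-exit depth scan over the whole stripped string, B extracts the inner substring, filters it down to its parentheses and decides balancedness by iterated string rewriting (repeatedly cancelling adjacent open-close pairs until none remains; balanced iff the residue is empty).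
import Mathlib
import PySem

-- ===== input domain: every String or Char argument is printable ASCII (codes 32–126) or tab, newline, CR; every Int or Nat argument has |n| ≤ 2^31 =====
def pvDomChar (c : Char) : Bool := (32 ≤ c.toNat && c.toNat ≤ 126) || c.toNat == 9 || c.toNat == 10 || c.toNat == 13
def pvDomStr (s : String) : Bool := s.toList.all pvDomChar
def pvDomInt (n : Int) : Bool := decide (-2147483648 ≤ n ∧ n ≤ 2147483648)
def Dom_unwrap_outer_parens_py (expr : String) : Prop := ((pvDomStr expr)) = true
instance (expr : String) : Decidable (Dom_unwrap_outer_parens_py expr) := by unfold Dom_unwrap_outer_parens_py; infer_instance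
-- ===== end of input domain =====

-- B replaces A's early-exit depth scan by a different algorithm: it takes the INNER
-- substring, filters it down to its parentheses and decides balancedness by iterated
-- string rewriting (cancelling adjacent open-close pairs until none is left).

-- ===== PORT A =====
-- A's for-loop with its early 'return expr': none = early return, some d = loop finished with depth d
def pvLoopA : List Char → Nat → Nat → Int → Option Int
  | [], _, _, d => some d
  | c :: rest, i, n, d =>
    if c = '(' then pvLoopA rest (i+1) n (d+1)
    else if c = ')' then
      if d - 1 = 0 ∧ i ≠ n - 1 then none
      else pvLoopA rest (i+1) n (d - 1)
    else pvLoopA rest (i+1) n d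

def unwrap_outer_parens_py (expr : String) : String :=
  let stripped := PySem.Str.strip expr
  if PySem.Str.startswith stripped "(" && PySem.Str.endswith stripped ")" then
    match pvLoopA stripped.toList 0 (stripped.toList.length) 0 with
    | none => expr
    | some d =>
      if d = 0 then
        let inner := PySem.Str.slice stripped (some 1) (some (-1))
        let leading := expr.toList.length - (PySem.Str.lstrip expr).toList.length
        let trailing := expr.toList.length - (PySem.Str.rstrip expr).toList.length
        String.ofList (List.replicate leading ' ' ++ inner.toList ++ List.replicate trailing ' ')
      else expr
  else expr

-- ===== PORT B =====
-- ch in "()" (membership in the two-character literal, written out)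
def pvParen (c : Char) : Bool := c = '(' || c = ')'

-- the replace-by-empty call on parens — hand port, exact for the fixed two-character pattern:
-- Python replaces non-overlapping occurrences left to right and continues AFTER
-- each replacement, which for the open-close pattern is exactly this scan.
def pvReplace : List Char → List Char
  | [] => []
  | [c] => [c]
  | c1 :: c2 :: rest =>
    if c1 = '(' ∧ c2 = ')' then pvReplace rest
    else c1 :: pvReplace (c2 :: rest)

-- the substring test on parens — hand port, exact: the two-character open-close pattern occurs iff some
-- adjacent pair is '(' followed by ')'.
def pvHasPair : List Char → Bool
  | [] => false
  | [_] => false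
  | c1 :: c2 :: rest => (c1 = '(' && c2 = ')') || pvHasPair (c2 :: rest)

-- B's while loop; the fuel only makes it total (each rewrite removes ≥ 2 chars,
-- so length + 1 rounds always suffice — the Python loop runs the same rounds).
def pvCancel : Nat → List Char → List Char
  | 0, p => p
  | fuel+1, p => if pvHasPair p then pvCancel fuel (pvReplace p) else p

def unwrap_outer_parens_py_alt (expr : String) : String :=
  let stripped := PySem.Str.strip expr
  if PySem.Str.startswith stripped "(" && PySem.Str.endswith stripped ")" then
    let inner := PySem.Str.slice stripped (some 1) (some (-1))
    let parens := inner.toList.filter pvParen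
    if pvCancel (parens.length + 1) parens ≠ [] then expr
    else
      let leading := expr.toList.length - (PySem.Str.lstrip expr).toList.length
      let trailing := expr.toList.length - (PySem.Str.rstrip expr).toList.length
      String.ofList (List.replicate leading ' ' ++ inner.toList ++ List.replicate trailing ' ')
  else expr

-- ===== PRECONDITION & SPEC =====
def Spec_unwrap_outer_parens_py (expr : String) (out : String) : Prop := out = unwrap_outer_parens_py_alt expr
instance (expr : String) (out : String) : Decidable (Spec_unwrap_outer_parens_py expr out) := by unfold Spec_unwrap_outer_parens_py; infer_instance

-- ===== CLAIM (what is proved, stated in full; the proofs are below) =====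
def Claim_equal_unwrap_outer_parens_py : Prop := ∀ (expr : String), Dom_unwrap_outer_parens_py expr → Spec_unwrap_outer_parens_py expr (unwrap_outer_parens_py expr)

-- ===== LEMMAS AND PROOFS =====

-- the contribution of one character to the parenthesis balance
def pvDelta (c : Char) : Int := if c = '(' then 1 else if c = ')' then -1 else 0

def pvBal : List Char → Int
  | [] => 0
  | c :: r => pvDelta c + pvBal r

-- every prefix balance (including the empty one) stays ≥ 0, starting from d
def pvNN : Int → List Char → Bool
  | d, [] => decide (0 ≤ d)
  | d, c :: r => decide (0 ≤ d) && pvNN (d + pvDelta c) r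

-- every prefix balance stays > 0, starting from d
def pvPos : Int → List Char → Bool
  | d, [] => decide (0 < d)
  | d, c :: r => decide (0 < d) && pvPos (d + pvDelta c) r

lemma pvPos_succ (l : List Char) : ∀ d : Int, pvPos (d + 1) l = pvNN d l := by
  induction l with
  | nil => intro d; simp [pvPos, pvNN]
  | cons c r ih =>
    intro d
    show (decide (0 < d + 1) && pvPos (d + 1 + pvDelta c) r) = (decide (0 ≤ d) && pvNN (d + pvDelta c) r)
    rw [show d + 1 + pvDelta c = (d + pvDelta c) + 1 by ring, ih]
    congr 1
    simp

lemma pvPos_nonpos (l : List Char) (d : Int) (h : d ≤ 0) : pvPos d l = false := by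
  cases l <;> simp [pvPos] <;> omega

lemma pvNN_neg (l : List Char) (d : Int) (h : d < 0) : pvNN d l = false := by
  cases l <;> simp [pvNN] <;> omega

lemma pvBal_filter (l : List Char) : pvBal (l.filter pvParen) = pvBal l := by
  induction l with
  | nil => rfl
  | cons c r ih =>
    by_cases h : pvParen c = true
    · simp [h, pvBal, ih]
    · have hδ : pvDelta c = 0 := by
        simp [pvParen] at h; simp [pvDelta, h.1, h.2]
    
      simp [h, pvBal, ih, hδ]

lemma pvNN_filter (l : List Char) : ∀ d : Int, pvNN d (l.filter pvParen) = pvNN d l := by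
  induction l with
  | nil => intro d; rfl
  | cons c r ih =>
    intro d
    by_cases h : pvParen c = true
    · simp only [List.filter_cons, h, if_pos]
      show (decide (0 ≤ d) && pvNN (d + pvDelta c) (r.filter pvParen)) = _
      rw [ih]; rfl
    · have hδ : pvDelta c = 0 := by
        simp [pvParen] at h; simp [pvDelta, h.1, h.2]
      simp only [List.filter_cons, h, Bool.false_eq_true, if_false]
      show pvNN d (r.filter pvParen) = (decide (0 ≤ d) && pvNN (d + pvDelta c) r)
      rw [ih, hδ, add_zero]
      by_cases hd : 0 ≤ d
      · simp [hd]
      · rw [pvNN_neg _ _ (by omega)]; simp [hd]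

-- pvReplace preserves the balance …
lemma pvReplace_bal (q : List Char) : pvBal (pvReplace q) = pvBal q := by
  induction q using pvReplace.induct with
  | case1 => rfl
  | case2 c => rfl
  | case3 c1 c2 rest h ih =>
    rw [pvReplace, if_pos h, ih, h.1, h.2]
    simp [pvBal, pvDelta]
  | case4 c1 c2 rest h ih =>
    rw [pvReplace, if_neg h]
    simp [pvBal, ih]

-- … and the nonnegative-prefix property
lemma pvReplace_nn (q : List Char) : ∀ d : Int, pvNN d (pvReplace q) = pvNN d q := by
  induction q using pvReplace.induct with
  | case1 => intro d; rfl
  | case2 c => intro d; rfl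
  | case3 c1 c2 rest h ih =>
    intro d
    rw [pvReplace, if_pos h, ih, h.1, h.2]
    show _ = (decide (0 ≤ d) && (decide (0 ≤ d + pvDelta '(') && pvNN (d + pvDelta '(' + pvDelta ')') rest))
    rw [show d + pvDelta '(' + pvDelta ')' = d by simp [pvDelta]]
    by_cases hd : 0 ≤ d
    · have : (0:Int) ≤ d + pvDelta '(' := by simp [pvDelta]; omega
      simp [hd, this]
    · rw [pvNN_neg _ _ (by omega)]; simp [hd]
  | case4 c1 c2 rest h ih =>
    intro d
    rw [pvReplace, if_neg h]
    show (decide (0 ≤ d) && pvNN (d + pvDelta c1) (pvReplace (c2 :: rest))) = _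
    rw [ih]; rfl

lemma pvReplace_length_le (q : List Char) : (pvReplace q).length ≤ q.length := by
  induction q using pvReplace.induct with
  | case1 => simp [pvReplace]
  | case2 c => simp [pvReplace]
  | case3 c1 c2 rest h ih => rw [pvReplace, if_pos h]; simp only [List.length_cons]; omega
  | case4 c1 c2 rest h ih => rw [pvReplace, if_neg h]; simp only [List.length_cons] at ih ⊢; omega

lemma pvReplace_length_lt (q : List Char) (h : pvHasPair q = true) :
    (pvReplace q).length + 2 ≤ q.length := by
  induction q using pvReplace.induct with
  | case1 => simp [pvHasPair] at h
  | case2 c => simp [pvHasPair] at h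
  | case3 c1 c2 rest hp ih =>
    rw [pvReplace, if_pos hp]
    have := pvReplace_length_le rest
    simp only [List.length_cons]; omega
  | case4 c1 c2 rest hp ih =>
    rw [pvReplace, if_neg hp]
    have hrest : pvHasPair (c2 :: rest) = true := by
      rw [pvHasPair] at h
      rcases Bool.or_eq_true_iff.mp h with h' | h'
      · exfalso; apply hp; constructor
        · exact of_decide_eq_true (Bool.and_eq_true_iff.mp h').1
        · exact of_decide_eq_true (Bool.and_eq_true_iff.mp h').2
      · exact h'
    have := ih hrest
    simp only [List.length_cons] at this ⊢; omega

lemma pvReplace_subset (q : List Char) : ∀ c ∈ pvReplace q, c ∈ q := by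
  induction q using pvReplace.induct with
  | case1 => simp [pvReplace]
  | case2 c => simp [pvReplace]
  | case3 c1 c2 rest h ih =>
    rw [pvReplace, if_pos h]
    intro c hc; exact List.mem_cons_of_mem _ (List.mem_cons_of_mem _ (ih c hc))
  | case4 c1 c2 rest h ih =>
    rw [pvReplace, if_neg h]
    intro c hc
    rcases List.mem_cons.mp hc with rfl | hc
    · exact List.mem_cons_self
    · exact List.mem_cons_of_mem _ (ih c hc)

-- a parenthesis-only word without an adjacent open-close pair is some closers then some openers
lemma pvNoPair_shape (q : List Char) (hpar : ∀ c ∈ q, pvParen c = true)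
    (hnp : pvHasPair q = false) :
    ∃ a b, q = List.replicate a ')' ++ List.replicate b '(' := by
  induction q with
  | nil => exact ⟨0, 0, rfl⟩
  | cons c rest ih =>
    have hrest : pvHasPair rest = false := by
      cases rest with
      | nil => rfl
      | cons c2 r =>
        rw [pvHasPair] at hnp
        exact (Bool.or_eq_false_iff.mp hnp).2
    obtain ⟨a, b, hab⟩ := ih (fun x hx => hpar x (List.mem_cons_of_mem _ hx)) hrest
    have hc := hpar c List.mem_cons_self
    simp [pvParen] at hc
    rcases hc with hc | hc
    · -- c = '(' : then a = 0, else the '(' is followed by ')'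
      subst hc
      have ha : a = 0 := by
        by_contra ha
        have : ∃ r', rest = ')' :: r' := by
          cases a with
          | zero => omega
          | succ a' => exact ⟨List.replicate a' ')' ++ List.replicate b '(', by simp [hab, List.replicate_succ]⟩
        obtain ⟨r', hr'⟩ := this
        rw [hr', pvHasPair] at hnp
        simp at hnp
      subst ha
      exact ⟨0, b + 1, by simp [hab, List.replicate_succ]⟩
    · subst hc
      exact ⟨a + 1, b, by simp [hab, List.replicate_succ]⟩

lemma pvBal_replicate_open (b : Nat) : pvBal (List.replicate b '(') = b := by
  induction b with
  | zero => rfl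
  | succ b ih => simp [List.replicate_succ, pvBal, pvDelta, ih]; ring

-- a parenthesis-only word with no open-close pair left is balanced only if it is empty
lemma pvNoPair_balanced_nil (q : List Char) (hpar : ∀ c ∈ q, pvParen c = true)
    (hnp : pvHasPair q = false) (hnn : pvNN 0 q = true) (hbal : pvBal q = 0) : q = [] := by
  obtain ⟨a, b, rfl⟩ := pvNoPair_shape q hpar hnp
  have ha : a = 0 := by
    by_contra ha
    obtain ⟨a', rfl⟩ : ∃ a', a = a' + 1 := ⟨a - 1, by omega⟩
    rw [List.replicate_succ, List.cons_append] at hnn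
    have : pvNN (0 + pvDelta ')') (List.replicate a' ')' ++ List.replicate b '(') = true := by
      rw [pvNN] at hnn
      exact (Bool.and_eq_true_iff.mp hnn).2
    rw [pvNN_neg _ _ (by simp [pvDelta])] at this
    exact absurd this (by simp)
  subst ha
  simp only [List.replicate_zero, List.nil_append] at hbal ⊢
  rw [pvBal_replicate_open] at hbal
  simp [show b = 0 by omega]

-- the rewriting loop empties the word exactly when it is balanced
lemma pvCancel_nil_iff (fuel : Nat) : ∀ q : List Char, q.length ≤ fuel →
    (∀ c ∈ q, pvParen c = true) →
    (pvCancel fuel q = [] ↔ (pvNN 0 q = true ∧ pvBal q = 0)) := by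
  induction fuel with
  | zero =>
    intro q hlen _
    have : q = [] := List.eq_nil_of_length_eq_zero (by omega)
    subst this
    simp [pvCancel, pvNN, pvBal]
  | succ fuel ih =>
    intro q hlen hpar
    rw [pvCancel]
    by_cases hp : pvHasPair q = true
    · rw [if_pos hp]
      have hlt := pvReplace_length_lt q hp
      have := ih (pvReplace q) (by omega) (fun c hc => hpar c (pvReplace_subset q c hc))
      rw [this, pvReplace_nn, pvReplace_bal]
    · rw [if_neg (by simp [hp])]
      have hp' : pvHasPair q = false := by
        cases h : pvHasPair q
        · rfl
        · exact absurd h hp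
      constructor
      · rintro rfl; simp [pvNN, pvBal]
      · rintro ⟨hnn, hbal⟩; exact pvNoPair_balanced_nil q hpar hp' hnn hbal

-- A's scan over a segment whose characters all sit strictly before index n-1:
-- it survives iff the depth stays positive, and then continues with the accumulated balance
lemma pvLoopA_seg (l : List Char) : ∀ (l2 : List Char) (i n : Nat) (d : Int),
    1 ≤ d → i + l.length + 1 ≤ n →
    pvLoopA (l ++ l2) i n d =
      if pvPos d l then pvLoopA l2 (i + l.length) n (d + pvBal l) else none := by
  induction l with
  | nil =>
    intro l2 i n d hd _
    rw [if_pos]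
    · simp [pvBal]
    · simp [pvPos]; omega
  | cons c l' ih =>
    intro l2 i n d hd hn
    simp only [List.length_cons] at hn
    by_cases hc : c = '('
    · subst hc
      rw [List.cons_append, show pvLoopA ('(' :: (l' ++ l2)) i n d = pvLoopA (l' ++ l2) (i+1) n (d+1) by rw [pvLoopA, if_pos rfl]]
      rw [ih l2 (i+1) n (d+1) (by omega) (by omega)]
      have hpos : pvPos d ('(' :: l') = pvPos (d + 1) l' := by
        show (decide (0 < d) && pvPos (d + pvDelta '(') l') = _
        rw [show d + pvDelta '(' = d + 1 by simp [pvDelta], decide_eq_true (by omega : (0:Int) < d), Bool.true_and]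
      rw [hpos,
          show (i:Nat) + 1 + l'.length = i + ('(' :: l').length by simp only [List.length_cons]; omega,
          show d + 1 + pvBal l' = d + pvBal ('(' :: l') by simp [pvBal, pvDelta]; ring]
    · by_cases hc' : c = ')'
      · subst hc'
        have hine : i ≠ n - 1 := by omega
        by_cases hd1 : d = 1
        · subst hd1
          rw [List.cons_append, show pvLoopA (')' :: (l' ++ l2)) i n 1 = none by
            rw [pvLoopA, if_neg (by decide), if_pos rfl, if_pos ⟨by norm_num, hine⟩]]
          rw [if_neg]
          show ¬ (decide (0 < (1:Int)) && pvPos (1 + pvDelta ')') l') = true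
          rw [show (1:Int) + pvDelta ')' = 0 by simp [pvDelta]]
          rw [pvPos_nonpos l' 0 le_rfl]
          simp
        · rw [List.cons_append, show pvLoopA (')' :: (l' ++ l2)) i n d = pvLoopA (l' ++ l2) (i+1) n (d-1) by
            rw [pvLoopA, if_neg (by decide), if_pos rfl, if_neg (by rintro ⟨h1, -⟩; exact hd1 (by omega))]]
          rw [ih l2 (i+1) n (d-1) (by omega) (by omega)]
          have hpos : pvPos d (')' :: l') = pvPos (d - 1) l' := by
            show (decide (0 < d) && pvPos (d + pvDelta ')') l') = _
            rw [show d + pvDelta ')' = d - 1 by simp [pvDelta]; ring,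
                decide_eq_true (by omega : (0:Int) < d), Bool.true_and]
          rw [hpos,
              show (i:Nat) + 1 + l'.length = i + (')' :: l').length by simp only [List.length_cons]; omega,
              show d - 1 + pvBal l' = d + pvBal (')' :: l') by simp [pvBal, pvDelta]; ring]
      · rw [List.cons_append, show pvLoopA (c :: (l' ++ l2)) i n d = pvLoopA (l' ++ l2) (i+1) n d by
          rw [pvLoopA, if_neg hc, if_neg hc']]
        rw [ih l2 (i+1) n d hd (by omega)]
        have hpos : pvPos d (c :: l') = pvPos d l' := by
          show (decide (0 < d) && pvPos (d + pvDelta c) l') = _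
          rw [show d + pvDelta c = d by simp [pvDelta, hc, hc'],
              decide_eq_true (by omega : (0:Int) < d), Bool.true_and]
        rw [hpos,
            show (i:Nat) + 1 + l'.length = i + (c :: l').length by simp only [List.length_cons]; omega,
            show d + pvBal l' = d + pvBal (c :: l') by simp [pvBal, pvDelta, hc, hc']]

lemma pvSliceInner (inner : List Char) (c d : Char) :
    PySem.List.slice (c :: inner ++ [d]) (some 1) (some (-1)) = inner := by
  simp [PySem.List.slice, PySem.List.clampIdx]
  rw [if_neg (by omega)]
  simp

-- ===== VERDICT (by name: the statement is the Claim_ definition above) =====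
theorem unwrap_outer_parens_py_spec : Claim_equal_unwrap_outer_parens_py := by
  intro expr _
  unfold Spec_unwrap_outer_parens_py
  simp only [unwrap_outer_parens_py, unwrap_outer_parens_py_alt]
  by_cases hg : (PySem.Str.startswith (PySem.Str.strip expr) "(" && PySem.Str.endswith (PySem.Str.strip expr) ")") = true
  · rw [if_pos hg, if_pos hg]
    have hs : PySem.Str.startswith (PySem.Str.strip expr) "(" = true := ((Bool.and_eq_true _ _).mp hg).1
    have he : PySem.Str.endswith (PySem.Str.strip expr) ")" = true := ((Bool.and_eq_true _ _).mp hg).2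
    rw [PySem.Str.startswith_eq] at hs
    rw [PySem.Str.endswith_eq] at he
    rcases (PySem.Chars.startswith_iff _ _).mp hs with ⟨t, ht⟩
    rcases (PySem.Chars.endswith_iff _ _).mp he with ⟨u, hu⟩
    have hl : (PySem.Str.strip expr).toList = '(' :: t := by simpa using ht.symm
    have hl2 : (PySem.Str.strip expr).toList = u ++ [')'] := by simpa using hu.symm
    -- u is nonempty and starts with '('
    obtain ⟨inner, hinner⟩ : ∃ inner, t = inner ++ [')'] := by
      cases u with
      | nil => rw [hl] at hl2; simp at hl2
      | cons u0 u' =>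
        rw [hl] at hl2
        simp only [List.cons_append, List.cons.injEq] at hl2
        exact ⟨u', hl2.2⟩
    subst hinner
    rw [hl]
    -- evaluate A's loop
    have hlen : ('(' :: (inner ++ [')'])).length = inner.length + 2 := by simp
    have hstep : pvLoopA ('(' :: (inner ++ [')'])) 0 (inner.length + 2) 0
        = pvLoopA (inner ++ [')']) 1 (inner.length + 2) 1 := by
      rw [pvLoopA]; simp
    have hseg := pvLoopA_seg inner [')'] 1 (inner.length + 2) 1 le_rfl (by omega)
    have htail : pvLoopA [')'] (1 + inner.length) (inner.length + 2) (1 + pvBal inner)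
        = some (pvBal inner) := by
      rw [pvLoopA, if_neg (by decide), if_pos rfl,
          if_neg (by rintro ⟨-, h⟩; exact h (by omega)),
          pvLoopA, show (1:Int) + pvBal inner - 1 = pvBal inner by ring]
    -- B's condition
    have hslice : (PySem.Str.slice (PySem.Str.strip expr) (some 1) (some (-1))).toList
        = inner := by
      rw [PySem.Str.toList_slice, PySem.Chars.slice_eq_listSlice, hl]
      exact pvSliceInner inner '(' ')'
    have hparen : ∀ c ∈ inner.filter pvParen, pvParen c = true := fun c hc => List.of_mem_filter hc
    have hcanc := pvCancel_nil_iff ((inner.filter pvParen).length + 1) (inner.filter pvParen)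
      (by omega) hparen
    rw [pvNN_filter, pvBal_filter] at hcanc
    have hposnn : pvPos 1 inner = pvNN 0 inner := by
      have := pvPos_succ inner 0
      simpa using this
    -- case split on the balancedness condition
    rw [hlen, hstep, hseg, hslice]
    by_cases hbal : pvNN 0 inner = true ∧ pvBal inner = 0
    · rw [if_pos (by rw [hposnn]; exact hbal.1), htail, hbal.2,
          if_neg (fun hne => hne (hcanc.mpr hbal))]
      simp
    · have hne : pvCancel ((inner.filter pvParen).length + 1) (inner.filter pvParen) ≠ [] :=
        fun h => hbal (hcanc.mp h)
      by_cases hpos : pvPos 1 inner = true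
      · -- prefixes fine but total balance nonzero
        have hnn : pvNN 0 inner = true := by rw [← hposnn]; exact hpos
        have hb : pvBal inner ≠ 0 := fun h => hbal ⟨hnn, h⟩
        rw [if_pos hpos, htail, if_pos hne]
        simp [hb]
      · rw [if_neg hpos, if_pos hne]
  · rw [if_neg hg, if_neg hg]
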